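-- pv_equiv track=rewrite | github.com/Panth1823/HR_QUE_EASY | BXL A2 Q1.py | is_pstring
-- ===== SOURCE A (Python) =====
-- def is_pstring(s, p):
--   if len(s) % p != 0:
--     return False
--   counts = {}
--   for c in s:
--     if c not in counts:
--       counts[c] = 0
--     counts[c] += 1
--   for c in counts:
--     if counts[c] % 2 != 0:
--       return False
--   return True
-- ===== SOURCE B (Python) =====
-- def is_pstring(s, p):
--     if len(s) % p != 0:
--         return False
--     seen = set()
--     for c in s:
--         if c in seen:
--             seen.remove(c)
--         else:
--             seen.add(c)
--     return not seen
-- ===== Notes on version B (the rewrite author's own statement) =====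
-- stated objective: simpler
-- what changed: Replaces the count-dictionary build plus a second scan over the counts with a single pass that toggles each character in/out of an odd-parity set and checks the set is empty at the end.
import Mathlib
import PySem

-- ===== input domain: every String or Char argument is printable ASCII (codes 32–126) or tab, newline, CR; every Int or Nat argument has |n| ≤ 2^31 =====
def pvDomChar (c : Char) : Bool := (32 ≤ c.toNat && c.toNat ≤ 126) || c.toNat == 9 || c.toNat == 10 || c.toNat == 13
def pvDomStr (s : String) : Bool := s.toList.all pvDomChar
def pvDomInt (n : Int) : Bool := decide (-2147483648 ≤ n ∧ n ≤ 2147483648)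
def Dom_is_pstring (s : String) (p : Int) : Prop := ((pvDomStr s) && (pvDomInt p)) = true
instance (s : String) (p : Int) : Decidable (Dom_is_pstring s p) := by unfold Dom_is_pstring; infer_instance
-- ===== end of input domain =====

-- B replaces A's count-dict build plus second scan by one parity-toggling pass over a set (objective: simpler).

-- ===== PORT A =====
-- loop body: 'if c not in counts: counts[c] = 0' then 'counts[c] += 1'
def pvCountStep (d : PySem.Dict Char Int) (c : Char) : PySem.Dict Char Int :=
  let d1 := if d.contains c then d else d.insert c 0
  d1.insert c (d1.getD c 0 + 1)

def is_pstring (s : String) (p : Int) : Bool :=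
  if PySem.Int.mod (PySem.Str.len s) p ≠ 0 then false
  else
    let counts := s.toList.foldl pvCountStep PySem.Dict.empty
    -- 'for c in counts: if counts[c] % 2 != 0: return False' then 'return True'
    counts.keys.all (fun c => !(PySem.Int.mod (counts.getD c 0) 2 ≠ 0))

-- ===== PORT B =====
-- loop body: 'if c in seen: seen.remove(c) else: seen.add(c)'
def pvToggle (st : PySem.Set Char) (c : Char) : PySem.Set Char :=
  if PySem.Set.contains st c then PySem.Set.discard st c else PySem.Set.add st c

def is_pstring_alt (s : String) (p : Int) : Bool :=
  if PySem.Int.mod (PySem.Str.len s) p ≠ 0 then false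
  else
    let seen := s.toList.foldl pvToggle PySem.Set.empty
    seen.isEmpty  -- 'return not seen'

-- ===== PRECONDITION & SPEC =====
-- Pre_ excludes only p = 0, where Python's 'len(s) % p' raises ZeroDivisionError (in both A and B).
def Pre_is_pstring (s : String) (p : Int) : Prop := p ≠ 0
instance (s : String) (p : Int) : Decidable (Pre_is_pstring s p) := by unfold Pre_is_pstring; infer_instance
def pvWitness_is_pstring : String × Int := ("aabb", 2)

def Spec_is_pstring (s : String) (p : Int) (out : Bool) : Prop := out = is_pstring_alt s p
instance (s : String) (p : Int) (out : Bool) : Decidable (Spec_is_pstring s p out) := by unfold Spec_is_pstring; infer_instance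

-- ===== CLAIM (what is proved, stated in full; the proofs are below) =====
def Claim_equal_is_pstring : Prop := ∀ (s : String) (p : Int), Dom_is_pstring s p → Pre_is_pstring s p → Spec_is_pstring s p (is_pstring s p)

-- ===== LEMMAS AND PROOFS =====

-- A's loop step is the standard counting step, so A's dict is Counter(s).
theorem pvCountStep_eq (d : PySem.Dict Char Int) (c : Char) :
    pvCountStep d c = d.insert c (d.getD c 0 + 1) := by
  unfold pvCountStep
  by_cases h : d.contains c = true
  · simp [h]
  · simp only [Bool.not_eq_true] at h
    simp only [h, Bool.false_eq_true, if_false]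
    rw [PySem.Dict.insert_insert_self]
    simp [PySem.Dict.getD_of_not_contains, h]

theorem pvCounts_eq (l : List Char) :
    l.foldl pvCountStep PySem.Dict.empty = PySem.Dict.counter l := by
  rw [PySem.List.foldl_congr_mem (g := fun d x => d.insert x (d.getD x 0 + 1))
    (h := fun acc x _ => pvCountStep_eq acc x)]
  exact PySem.Dict.foldl_insert_getD_add_one_eq_counter l

-- A's second loop over Counter(s): all keys have an even count ↔ every char of s has an even count.
theorem pvA_all (l : List Char) :
    ((PySem.Dict.counter l).keys.all
        fun c => !decide (PySem.Int.mod ((PySem.Dict.counter l).getD c 0) 2 ≠ 0)) = true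
      ↔ ∀ c ∈ l, l.count c % 2 = 0 := by
  rw [List.all_eq_true]
  constructor
  · intro h c hc
    have := h c (by rw [PySem.Dict.keys_counter]; exact (PySem.Set.mem_ofList l c).mpr hc)
    rw [PySem.Dict.getD_counter] at this
    have hm : PySem.Int.mod ((l.count c : Int)) 2 = ((l.count c % 2 : Nat) : Int) := by
      exact_mod_cast PySem.Int.mod_natCast (l.count c) 2
    simp only [hm] at this
    simp at this
    obtain ⟨k, hk⟩ := this
    omega
  · intro h c hc
    rw [PySem.Dict.keys_counter] at hc
    have hc' := (PySem.Set.mem_ofList l c).mp hc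
    rw [PySem.Dict.getD_counter]
    have hm : PySem.Int.mod ((l.count c : Int)) 2 = ((l.count c % 2 : Nat) : Int) := by
      exact_mod_cast PySem.Int.mod_natCast (l.count c) 2
    simp only [hm]
    simp
    exact_mod_cast Nat.dvd_of_mod_eq_zero (h c hc')

-- B's toggling fold: a char is in the set iff its count so far is odd (and the set stays duplicate-free).
theorem pvToggle_invariant (l : List Char) (st : PySem.Set Char) (hn : st.Nodup) :
    (l.foldl pvToggle st).Nodup ∧
      ∀ c, (c ∈ l.foldl pvToggle st ↔ (c ∈ st ↔ l.count c % 2 = 0)) := by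
  induction l generalizing st with
  | nil => exact ⟨hn, fun c => by simp⟩
  | cons x xs ih =>
    have hstep : (pvToggle st x).Nodup := by
      unfold pvToggle; split
      · exact PySem.Set.nodup_discard st x hn
      · exact PySem.Set.nodup_add st x hn
    have hmem : ∀ c, c ∈ pvToggle st x ↔ ((c ∈ st ∧ c ≠ x) ∨ (c ∉ st ∧ c = x)) := by
      intro c
      unfold pvToggle
      by_cases hx : x ∈ st
      · rw [if_pos ((PySem.Set.contains_iff st x).mpr hx), PySem.Set.mem_discard]
        constructor
        · exact fun ⟨h1, h2⟩ => Or.inl ⟨h1, h2⟩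
        · rintro (⟨h1, h2⟩ | ⟨h1, h2⟩)
          · exact ⟨h1, h2⟩
          · exact absurd (h2 ▸ hx) h1
      · rw [if_neg (by simpa using fun h => hx ((PySem.Set.contains_iff st x).mp h)),
          PySem.Set.mem_add]
        constructor
        · rintro (h | h)
          · exact Or.inl ⟨h, fun he => hx (he ▸ h)⟩
          · exact Or.inr ⟨fun hc => hx (h ▸ hc), h⟩
        · rintro (⟨h1, _⟩ | ⟨_, h2⟩)
          · exact Or.inl h1
          · exact Or.inr h2
    obtain ⟨hnd, hiff⟩ := ih (pvToggle st x) hstep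
    refine ⟨by simpa using hnd, fun c => ?_⟩
    rw [List.foldl_cons, hiff c, hmem c]
    by_cases hcx : c = x
    · subst hcx
      simp only [ne_eq, not_true_eq_false, and_false, false_or, List.count_cons_self]
      by_cases hpar : xs.count c % 2 = 0
      · have h2 : ¬ (xs.count c + 1) % 2 = 0 := by omega
        by_cases hc : c ∈ st <;> simp [hc, hpar, h2]
      · have h2 : (xs.count c + 1) % 2 = 0 := by omega
        by_cases hc : c ∈ st <;> simp [hc, hpar, h2]
    · rw [List.count_cons_of_ne (fun h => hcx h.symm)]
      by_cases hc : c ∈ st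
      · simp [hc, hcx]
      · simp [hc, hcx]

-- The two else-branches agree: all counts even ⟺ the toggled set is empty.
theorem pvAB (l : List Char) :
    ((PySem.Dict.counter l).keys.all
        fun c => !decide (PySem.Int.mod ((PySem.Dict.counter l).getD c 0) 2 ≠ 0))
      = (l.foldl pvToggle PySem.Set.empty).isEmpty := by
  obtain ⟨_, hinv⟩ := pvToggle_invariant l PySem.Set.empty (by simp [PySem.Set.empty])
  have hmem2 : ∀ c, c ∈ l.foldl pvToggle PySem.Set.empty ↔ ¬ (l.count c % 2 = 0) := by
    intro c
    rw [hinv c]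
    simp [PySem.Set.empty]
  have hB : (l.foldl pvToggle PySem.Set.empty).isEmpty = true ↔ ∀ c ∈ l, l.count c % 2 = 0 := by
    rw [List.isEmpty_iff, List.eq_nil_iff_forall_not_mem]
    constructor
    · intro h c hc
      have := h c
      rw [hmem2 c] at this
      omega
    · intro h c
      rw [hmem2 c]
      by_cases hc : c ∈ l
      · simp [h c hc]
      · simp [List.count_eq_zero_of_not_mem hc]
  rw [← Bool.coe_iff_coe, pvA_all l, hB]

-- ===== VERDICT (by name: the statement is the Claim_ definition above) =====
theorem is_pstring_spec : Claim_equal_is_pstring := by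
  intro s p _ _
  unfold Spec_is_pstring is_pstring is_pstring_alt
  by_cases hg : PySem.Int.mod (PySem.Str.len s) p ≠ 0
  · rw [if_pos hg, if_pos hg]
  · rw [if_neg hg, if_neg hg]
    simp only [pvCounts_eq]
    exact pvAB s.toList
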